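-- pv_equiv track=rewrite | github.com/caicanting/programming-niukeOJ-python | yanghuisanjiao.py | compute_index
-- ===== SOURCE A (Python) =====
-- def compute_index(n):
--     d = [[0 for i in range(1)] for j in range(n + 1)]
--     d[1].append(1)
--     for i in range(2, n + 1):
--         for j in range(2 * i - 1):
--             if j - 2 <= 0:
--                 d[i].append(sum(d[i - 1][1: j + 2]))
--             elif j + 2 > len(d[i - 1]):
--                 d[i].append(sum(d[i - 1][j - 1:]))
--             else:
--                 d[i].append(sum(d[i - 1][j - 1:j + 2]))
--     for i in range(1, len(d[n])):
--         if d[n][i] % 2 == 0: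
--             return i
--     return -1
-- ===== SOURCE B (Python) =====
-- def compute_index(n):
--     # Closed form. Row n of A's table is 0 followed by the trinomial coefficients
--     # T(n-1, k) of (1+x+x^2)**(n-1); the scan always stops by the 4th entry:
--     # T(m,0)=1 (odd), T(m,1)=m, T(m,2)=m(m+1)/2, and T(m,3) is odd iff m%4==3.
--     # Rows with n <= 2 contain only odd entries.
--     if n <= 2:
--         return -1
--     if n % 2 == 1:
--         return 2
--     return 3 if n % 4 == 0 else 4
-- ===== Notes on version B (the rewrite author's own statement) =====
-- stated objective: faster
-- what changed: Replaced the O(n^2) dynamic-programming table of trinomial coefficients and its row scan by the closed-form parity answer (the scan always terminates within the first four entries, whose parities depend only on n mod 4), proved via parity lemmas for T(m,1), T(m,2), T(m,3).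
import Mathlib
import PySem

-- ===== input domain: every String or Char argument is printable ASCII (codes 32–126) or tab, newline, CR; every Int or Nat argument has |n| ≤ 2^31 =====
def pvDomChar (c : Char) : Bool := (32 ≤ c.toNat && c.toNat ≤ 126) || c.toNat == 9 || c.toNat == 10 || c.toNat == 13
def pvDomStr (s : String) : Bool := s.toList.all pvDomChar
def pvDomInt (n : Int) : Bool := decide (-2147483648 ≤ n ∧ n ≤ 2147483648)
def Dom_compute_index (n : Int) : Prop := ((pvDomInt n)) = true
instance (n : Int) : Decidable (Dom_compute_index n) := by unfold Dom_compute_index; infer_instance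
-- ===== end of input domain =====

-- B replaces A's O(n^2) trinomial-coefficient table by the closed-form parity answer;
-- A raises IndexError for n ≤ 0, excluded by Pre_.


-- ===== PORT A =====
-- the three-branch body of A's inner loop ('sum(d[i-1][...])' in its three slice forms)
def rowEntry (prev : List Int) (j : Int) : Int :=
  if j - 2 ≤ 0 then (PySem.List.slice prev (some 1) (some (j + 2))).sum
  else if j + 2 > (prev.length : Int) then (PySem.List.slice prev (some (j - 1)) none).sum
  else (PySem.List.slice prev (some (j - 1)) (some (j + 2))).sum

-- 'for i in range(1, len(d[n])): if d[n][i] % 2 == 0: return i' / 'return -1'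
def scanRow (row : List Int) : List Int → Int
  | [] => -1
  | i :: rest => if PySem.Int.mod (PySem.List.pyGetD row i 0) 2 = 0 then i else scanRow row rest

def compute_index (n : Int) : Int :=
  -- d = [[0 for i in range(1)] for j in range(n + 1)]
  let d0 : List (List Int) := (PySem.List.pyRange 0 (n + 1) 1).map (fun _ => [(0 : Int)])
  -- d[1].append(1): index 1 exists iff n ≥ 1 (= Pre_); Python raises IndexError otherwise
  let d1 := d0.modify 1 (fun r => r ++ [(1 : Int)])
  -- the nested loops; throughout, 2 ≤ i ≤ n and 0 ≤ j, so the indices i (toNat-modify)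
  -- and i-1 (pyGetD, 1 ≤ i-1 < len d) are in range and the port is exact
  let d2 := (PySem.List.pyRange 2 (n + 1) 1).foldl (fun d i =>
      (PySem.List.pyRange 0 (2 * i - 1) 1).foldl (fun d j =>
        d.modify i.toNat (fun r => r ++ [rowEntry (PySem.List.pyGetD d (i - 1) []) j])) d) d1
  -- d[n] (in range for n ≥ 1), then the final scan
  let dn := PySem.List.pyGetD d2 n []
  scanRow dn (PySem.List.pyRange 1 (dn.length : Int) 1)

-- ===== PORT B =====
def compute_index_alt (n : Int) : Int :=
  if n ≤ 2 then -1
  else if PySem.Int.mod n 2 = 1 then 2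
  else if PySem.Int.mod n 4 = 0 then 3
  else 4

-- ===== PRECONDITION & SPEC =====
-- Pre_ excludes exactly n ≤ 0, on which A's 'd[1].append(1)' raises IndexError (B returns -1 there).
def Pre_compute_index (n : Int) : Prop := 1 ≤ n
instance (n : Int) : Decidable (Pre_compute_index n) := by unfold Pre_compute_index; infer_instance
def pvWitness_compute_index : Int := 5

def Spec_compute_index (n : Int) (out : Int) : Prop := out = compute_index_alt n
instance (n : Int) (out : Int) : Decidable (Spec_compute_index n out) := by unfold Spec_compute_index; infer_instance

-- ===== CLAIM (what is proved, stated in full; the proofs are below) =====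
def Claim_equal_compute_index : Prop := ∀ (n : Int), Dom_compute_index n → Pre_compute_index n → Spec_compute_index n (compute_index n)

-- ===== LEMMAS AND PROOFS =====

-- Trinomial coefficients: T m k = coefficient of x^k in (1+x+x^2)^m.
def T : Nat → Int → Int
  | 0, k => if k = 0 then 1 else 0
  | m + 1, k => T m (k - 2) + T m (k - 1) + T m k

def trirow (m : Nat) : List Int := (List.range (2 * m + 1)).map (fun k : Nat => T m (k : Int))

lemma T_neg : ∀ (m : Nat) (k : Int), k < 0 → T m k = 0 := by
  intro m
  induction m with
  | zero => intro k hk; simp [T]; omega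
  | succ m ih => intro k hk; simp [T, ih (k - 2) (by omega), ih (k - 1) (by omega), ih k hk]

lemma T_big : ∀ (m : Nat) (k : Int), 2 * m < k → T m k = 0 := by
  intro m
  induction m with
  | zero => intro k hk; simp [T]; omega
  | succ m ih =>
      intro k hk
      have h2 : (2 : Int) * m < k - 2 := by push_cast at hk ⊢; omega
      simp [T, ih (k - 2) h2, ih (k - 1) (by omega), ih k (by omega)]

lemma T_zero (m : Nat) : T m 0 = 1 := by
  induction m with
  | zero => simp [T]
  | succ m ih => simp [T, ih, T_neg m (-2) (by omega), T_neg m (-1) (by omega)]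

lemma T_one (m : Nat) : T m 1 = m := by
  induction m with
  | zero => simp [T]
  | succ m ih =>
      show T m (1 - 2) + T m (1 - 1) + T m 1 = ((m + 1 : Nat) : Int)
      rw [show (1 : Int) - 2 = -1 from by norm_num, show (1 : Int) - 1 = 0 from by norm_num,
        T_neg m (-1) (by norm_num), T_zero m, ih]
      push_cast; ring

lemma T_two_rec (m : Nat) : T (m + 1) 2 = 1 + m + T m 2 := by
  show T m (2 - 2) + T m (2 - 1) + T m 2 = 1 + m + T m 2
  rw [show (2 : Int) - 2 = 0 from by norm_num, show (2 : Int) - 1 = 1 from by norm_num,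
    T_zero m, T_one m]

lemma T_three_rec (m : Nat) : T (m + 1) 3 = m + T m 2 + T m 3 := by
  show T m (3 - 2) + T m (3 - 1) + T m 3 = m + T m 2 + T m 3
  rw [show (3 : Int) - 2 = 1 from by norm_num, show (3 : Int) - 1 = 2 from by norm_num, T_one m]

lemma T_two_mod (m : Nat) :
    ((m % 4 = 1 ∨ m % 4 = 2) → T m 2 % 2 = 1) ∧ (¬(m % 4 = 1 ∨ m % 4 = 2) → T m 2 % 2 = 0) := by
  induction m with
  | zero => simp [T]
  | succ m ih =>
      rw [T_two_rec m]
      obtain ⟨h1, h2⟩ := ih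
      constructor <;> intro h <;> omega

lemma T_three_mod (m : Nat) :
    (m % 4 = 3 → T m 3 % 2 = 1) ∧ (m % 4 ≠ 3 → T m 3 % 2 = 0) := by
  induction m with
  | zero => simp [T]
  | succ m ih =>
      rw [T_three_rec m]
      obtain ⟨h1, h2⟩ := ih
      obtain ⟨g1, g2⟩ := T_two_mod m
      constructor <;> intro h <;> omega

lemma trirow_length (m : Nat) : (trirow m).length = 2 * m + 1 := by
  unfold trirow; rw [List.length_map, List.length_range]

lemma trirow_getD (m j : Nat) (hj : j < 2 * m + 1) : (trirow m).getD j 0 = T m (j : Int) := by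
  unfold trirow
  rw [List.getD_eq_getElem?_getD, List.getElem?_map, List.getElem?_range hj]
  rfl

-- the value A's inner loop appends at position k of row m+2 is the trinomial coefficient
lemma rowEntry_eq (m k : Nat) (hk : k < 2 * m + 3) :
    rowEntry ((0 : Int) :: trirow m) (k : Int) = T (m + 1) (k : Int) := by
  rcases Nat.eq_zero_or_pos m with hm | hm
  · subst hm; interval_cases k <;> decide
  · have hlen : ((((0 : Int) :: trirow m)).length : Int) = 2 * (m : Int) + 2 := by
      rw [List.length_cons, trirow_length]; push_cast; ring
    unfold rowEntry
    rw [hlen]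
    by_cases h1 : (k : Int) - 2 ≤ 0
    · rw [if_pos h1]
      rw [show (1 : Int) = ((1 : Nat) : Int) from rfl,
        show (k : Int) + 2 = ((k + 2 : Nat) : Int) from by push_cast; ring,
        PySem.List.slice_natCast]
      rw [show (k + 2) - 1 = k + 1 from by omega,
        show (1 : Nat) = 0 + 1 from rfl, List.drop_succ_cons, List.drop_zero]
      unfold trirow
      rw [← List.map_take, List.take_range]
      have hk2 : k ≤ 2 := by omega
      interval_cases k
      · rw [show min 1 (2 * m + 1) = 1 from by omega]
        show (List.map (fun j : Nat => T m (j : Int)) [0]).sum = T m (0 - 2) + T m (0 - 1) + T m 0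
        rw [show (0 : Int) - 2 = -2 from by norm_num, show (0 : Int) - 1 = -1 from by norm_num,
          T_neg m (-2) (by norm_num), T_neg m (-1) (by norm_num)]
        simp
      · rw [show min 2 (2 * m + 1) = 2 from by omega]
        show (List.map (fun j : Nat => T m (j : Int)) [0, 1]).sum = T m (1 - 2) + T m (1 - 1) + T m 1
        rw [show (1 : Int) - 2 = -1 from by norm_num, show (1 : Int) - 1 = 0 from by norm_num,
          T_neg m (-1) (by norm_num)]
        simp
      · rw [show min 3 (2 * m + 1) = 3 from by omega]
        show (List.map (fun j : Nat => T m (j : Int)) [0, 1, 2]).sum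
          = T m (2 - 2) + T m (2 - 1) + T m 2
        rw [show (2 : Int) - 2 = 0 from by norm_num, show (2 : Int) - 1 = 1 from by norm_num]
        simp; ring
    · rw [if_neg h1]
      have hk3 : 3 ≤ k := by omega
      by_cases h2 : (k : Int) + 2 > 2 * (m : Int) + 2
      · rw [if_pos h2]
        rw [PySem.List.slice_from _ (by omega : (0 : Int) ≤ (k : Int) - 1),
          show ((k : Int) - 1).toNat = (k - 2) + 1 from by omega, List.drop_succ_cons]
        unfold trirow
        rw [← List.map_drop, List.range_eq_range', List.drop_range']
        have hkk : k = 2 * m + 1 ∨ k = 2 * m + 2 := by omega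
        rcases hkk with hke | hke <;> subst hke
        · rw [show 0 + (2 * m + 1 - 2) * 1 = 2 * m - 1 from by omega,
            show 2 * m + 1 - (2 * m + 1 - 2) = 2 from by omega]
          show (List.map (fun j : Nat => T m (j : Int)) [2 * m - 1, 2 * m - 1 + 1]).sum
            = T m ((2 * m + 1 : Nat) - 2) + T m ((2 * m + 1 : Nat) - 1) + T m ((2 * m + 1 : Nat))
          rw [show ((2 * m + 1 : Nat) : Int) - 2 = ((2 * m - 1 : Nat) : Int) from by omega,
            show ((2 * m + 1 : Nat) : Int) - 1 = ((2 * m - 1 + 1 : Nat) : Int) from by omega,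
            T_big m ((2 * m + 1 : Nat)) (by push_cast; omega)]
          simp
        · rw [show 0 + (2 * m + 2 - 2) * 1 = 2 * m from by omega,
            show 2 * m + 1 - (2 * m + 2 - 2) = 1 from by omega]
          show (List.map (fun j : Nat => T m (j : Int)) [2 * m]).sum
            = T m ((2 * m + 2 : Nat) - 2) + T m ((2 * m + 2 : Nat) - 1) + T m ((2 * m + 2 : Nat))
          rw [show ((2 * m + 2 : Nat) : Int) - 2 = ((2 * m : Nat) : Int) from by omega,
            T_big m ((2 * m + 2 : Nat) - 1) (by push_cast; omega),
            T_big m ((2 * m + 2 : Nat)) (by push_cast; omega)]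
          simp
      · rw [if_neg h2]
        rw [show ((k : Int) - 1) = ((k - 1 : Nat) : Int) from by omega,
          show ((k : Int) + 2) = ((k + 2 : Nat) : Int) from by push_cast; ring,
          PySem.List.slice_natCast]
        rw [show (k + 2) - (k - 1) = 3 from by omega,
          show k - 1 = (k - 2) + 1 from by omega, List.drop_succ_cons]
        unfold trirow
        rw [← List.map_drop, List.range_eq_range', List.drop_range',
          show 0 + (k - 2) * 1 = k - 2 from by omega,
          ← List.map_take, List.take_range'_of_length_ge (by omega)]
        show (List.map (fun j : Nat => T m (j : Int)) [k - 2, k - 2 + 1, k - 2 + 1 + 1]).sum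
          = T m ((k : Int) - 2) + T m ((k : Int) - 1) + T m (k : Int)
        rw [show ((k : Int) - 2) = ((k - 2 : Nat) : Int) from by omega,
          show ((k : Int) - 1) = ((k - 2 + 1 : Nat) : Int) from by omega,
          show (k : Int) = ((k - 2 + 1 + 1 : Nat) : Int) from by omega]
        simp; ring

-- appending all inner-loop values to [0] yields the next row
lemma row_build (m : Nat) :
    (List.range (2 * m + 3)).map (fun k : Nat => rowEntry ((0 : Int) :: trirow m) (k : Int))
      = trirow (m + 1) := by
  unfold trirow
  rw [show 2 * (m + 1) + 1 = 2 * m + 3 from by omega]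
  exact List.map_congr_left (fun k hk => rowEntry_eq m k (List.mem_range.mp hk))

lemma getD_modify_ne (d : List (List Int)) (i j : Nat) (h : i ≠ j) (g : List Int → List Int) :
    (d.modify i g).getD j [] = d.getD j [] := by
  simp [List.getD_eq_getElem?_getD, h]

lemma modify_comp {α : Type} (l : List α) (i : Nat) (f g : α → α) :
    (l.modify i f).modify i g = l.modify i (fun x => g (f x)) := by
  apply List.ext_getElem?
  intro j
  by_cases h : i = j <;> simp [h, Function.comp_def]

lemma pyGetD_modify_pred (d : List (List Int)) (i : Int) (hi : 2 ≤ i)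
    (g : List Int → List Int) :
    PySem.List.pyGetD (d.modify i.toNat g) (i - 1) [] = PySem.List.pyGetD d (i - 1) [] := by
  rw [show i - 1 = (((i - 1).toNat : Nat) : Int) from by omega,
    PySem.List.pyGetD_natCast, PySem.List.pyGetD_natCast,
    getD_modify_ne d i.toNat (i - 1).toNat (by omega) g]

-- characterisation of A's inner loop: it appends the mapped values to row i and nothing else
lemma inner_eq (i : Int) (hi : 2 ≤ i) (js : List Int) :
    ∀ d : List (List Int),
      (js.foldl (fun d j =>
          d.modify i.toNat (fun r => r ++ [rowEntry (PySem.List.pyGetD d (i - 1) []) j])) d)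
        = d.modify i.toNat (fun r => r ++ js.map (rowEntry (PySem.List.pyGetD d (i - 1) []))) := by
  induction js with
  | nil =>
      intro d
      simp only [List.foldl_nil, List.map_nil, List.append_nil]
      apply List.ext_getElem?
      intro j
      by_cases h : i.toNat = j <;> simp [h]
  | cons j js ih =>
      intro d
      rw [List.foldl_cons, ih, pyGetD_modify_pred d i hi, modify_comp]
      congr 1
      funext r
      rw [List.map_cons, List.append_assoc, List.singleton_append]

-- invariant for the outer loop: rows 1..i are built, rows above i are still [0]
def goodState (n i : Int) (d : List (List Int)) : Prop :=
  d.length = (n + 1).toNat ∧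
    ∀ k : Nat, k < d.length →
      d[k]? = some (if 1 ≤ k ∧ (k : Int) ≤ i then (0 : Int) :: trirow (k - 1) else [(0 : Int)])

lemma step_good (n i : Int) (hi : 2 ≤ i) (hin : i ≤ n) (d : List (List Int))
    (hd : goodState n (i - 1) d) :
    goodState n i ((PySem.List.pyRange 0 (2 * i - 1) 1).foldl (fun d j =>
      d.modify i.toNat (fun r => r ++ [rowEntry (PySem.List.pyGetD d (i - 1) []) j])) d) := by
  obtain ⟨hlen, hrows⟩ := hd
  have hiN : i.toNat < d.length := by rw [hlen]; omega
  have hprev : PySem.List.pyGetD d (i - 1) [] = (0 : Int) :: trirow (i - 2).toNat := by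
    rw [show i - 1 = (((i - 1).toNat : Nat) : Int) from by omega, PySem.List.pyGetD_natCast,
      List.getD_eq_getElem?_getD, hrows (i - 1).toNat (by omega)]
    rw [if_pos ⟨by omega, by omega⟩]
    simp only [Option.getD_some]
    congr 2
    omega
  rw [inner_eq i hi _ d, hprev]
  have hjs : PySem.List.pyRange 0 (2 * i - 1) 1
      = (List.range (2 * (i - 2).toNat + 3)).map (fun k : Nat => (k : Int)) := by
    rw [show 2 * i - 1 = ((2 * (i - 2).toNat + 3 : Nat) : Int) from by omega]
    exact PySem.List.pyRange_zero_nat _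
  rw [hjs, List.map_map]
  have hmap : (List.range (2 * (i - 2).toNat + 3)).map
      ((rowEntry ((0 : Int) :: trirow (i - 2).toNat)) ∘ (fun k : Nat => (k : Int)))
      = trirow ((i - 2).toNat + 1) := by
    rw [← row_build (i - 2).toNat]
    rfl
  rw [hmap]
  constructor
  · rw [List.length_modify, hlen]
  · intro k hk
    rw [List.length_modify] at hk
    rw [List.getElem?_modify]
    by_cases h : i.toNat = k
    · subst h
      rw [hrows i.toNat hk]
      have hc : ¬(1 ≤ i.toNat ∧ (i.toNat : Int) ≤ i - 1) := by omega
      have hc2 : 1 ≤ i.toNat ∧ (i.toNat : Int) ≤ i := ⟨by omega, by omega⟩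
      have he : i.toNat - 1 = (i - 2).toNat + 1 := by omega
      show some (if i.toNat = i.toNat then
          (if 1 ≤ i.toNat ∧ (i.toNat : Int) ≤ i - 1 then (0 : Int) :: trirow (i.toNat - 1)
            else [(0 : Int)]) ++ trirow ((i - 2).toNat + 1)
          else (if 1 ≤ i.toNat ∧ (i.toNat : Int) ≤ i - 1 then (0 : Int) :: trirow (i.toNat - 1)
            else [(0 : Int)]))
        = some (if 1 ≤ i.toNat ∧ (i.toNat : Int) ≤ i then (0 : Int) :: trirow (i.toNat - 1)
            else [(0 : Int)])
      rw [if_pos rfl, if_neg hc, if_pos hc2, he, List.singleton_append]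
    · rw [hrows k hk]
      have hiff : (1 ≤ k ∧ (k : Int) ≤ i - 1) ↔ (1 ≤ k ∧ (k : Int) ≤ i) := by omega
      show some (if i.toNat = k then
          (if 1 ≤ k ∧ (k : Int) ≤ i - 1 then (0 : Int) :: trirow (k - 1)
            else [(0 : Int)]) ++ trirow ((i - 2).toNat + 1)
          else (if 1 ≤ k ∧ (k : Int) ≤ i - 1 then (0 : Int) :: trirow (k - 1) else [(0 : Int)]))
        = some (if 1 ≤ k ∧ (k : Int) ≤ i then (0 : Int) :: trirow (k - 1) else [(0 : Int)])
      rw [if_neg h]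
      exact congrArg some (if_congr hiff rfl rfl)

lemma init_good (n : Int) (hn : 1 ≤ n) :
    goodState n 1 (((PySem.List.pyRange 0 (n + 1) 1).map (fun _ => [(0 : Int)])).modify 1
      (fun r => r ++ [(1 : Int)])) := by
  have hr : PySem.List.pyRange 0 (n + 1) 1 = (List.range (n + 1).toNat).map (fun k : Nat => (k : Int)) := by
    rw [show n + 1 = (((n + 1).toNat : Nat) : Int) from by omega]
    exact PySem.List.pyRange_zero_nat _
  rw [hr, List.map_map]
  constructor
  · rw [List.length_modify, List.length_map, List.length_range]
  · intro k hk
    rw [List.length_modify, List.length_map, List.length_range] at hk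
    rw [List.getElem?_modify, List.getElem?_map, List.getElem?_range hk]
    by_cases h : (1 : Nat) = k
    · subst h
      rw [if_pos ⟨le_refl 1, by norm_num⟩]
      rfl
    · rw [if_neg (by omega : ¬(1 ≤ k ∧ (k : Int) ≤ 1))]
      simp [h]

lemma outer_good (n : Int) (d1 : List (List Int)) (h1 : goodState n 1 d1) :
    ∀ t : Nat, (t : Int) ≤ n - 1 →
      goodState n (1 + t) ((PySem.List.pyRange 2 (1 + t + 1) 1).foldl (fun d i =>
        (PySem.List.pyRange 0 (2 * i - 1) 1).foldl (fun d j =>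
          d.modify i.toNat (fun r => r ++ [rowEntry (PySem.List.pyGetD d (i - 1) []) j])) d) d1) := by
  intro t
  induction t with
  | zero =>
      intro _
      rw [PySem.List.pyRange_one_eq_nil (by norm_num)]
      simpa using h1
  | succ t ih =>
      intro ht
      have ht' : (t : Int) ≤ n - 1 := by push_cast at ht ⊢; omega
      have hsplit : PySem.List.pyRange 2 (1 + ((t : Int) + 1) + 1) 1
          = PySem.List.pyRange 2 (1 + (t : Int) + 1) 1 ++ [1 + (t : Int) + 1] := by
        rw [show 1 + ((t : Int) + 1) + 1 = (1 + (t : Int) + 1) + 1 from by ring]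
        exact PySem.List.pyRange_one_succ_right (by omega)
      rw [show ((t + 1 : Nat) : Int) = (t : Int) + 1 from by push_cast; ring, hsplit,
        List.foldl_append, List.foldl_cons, List.foldl_nil]
      have hstep := step_good n (1 + (t : Int) + 1) (by omega) (by omega) _
        (by
          have := ih ht'
          rw [show 1 + (t : Int) + 1 - 1 = 1 + (t : Int) from by ring]
          exact this)
      rw [show 1 + ((t : Int) + 1) = 1 + (t : Int) + 1 from by ring]
      exact hstep

lemma compute_eq_scan (n : Int) (hn : 1 ≤ n) :
    compute_index n = scanRow ((0 : Int) :: trirow (n - 1).toNat)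
      (PySem.List.pyRange 1 ((2 * (n - 1).toNat + 2 : Nat) : Int) 1) := by
  have hout := outer_good n _ (init_good n hn) (n - 1).toNat (by omega)
  rw [show 1 + (((n - 1).toNat : Nat) : Int) = n from by omega] at hout
  unfold compute_index
  simp only []
  rw [show n + 1 = n + 1 from rfl]
  obtain ⟨hlen, hrows⟩ := hout
  have hdn : PySem.List.pyGetD ((PySem.List.pyRange 2 (n + 1) 1).foldl (fun d i =>
      (PySem.List.pyRange 0 (2 * i - 1) 1).foldl (fun d j =>
        d.modify i.toNat (fun r => r ++ [rowEntry (PySem.List.pyGetD d (i - 1) []) j])) d)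
      (((PySem.List.pyRange 0 (n + 1) 1).map (fun _ => [(0 : Int)])).modify 1
        (fun r => r ++ [(1 : Int)]))) n []
      = (0 : Int) :: trirow (n - 1).toNat := by
    have hklen : n.toNat < (((PySem.List.pyRange 2 (n + 1) 1).foldl (fun d i =>
        (PySem.List.pyRange 0 (2 * i - 1) 1).foldl (fun d j =>
          d.modify i.toNat (fun r => r ++ [rowEntry (PySem.List.pyGetD d (i - 1) []) j])) d)
        (((PySem.List.pyRange 0 (n + 1) 1).map (fun _ => [(0 : Int)])).modify 1
          (fun r => r ++ [(1 : Int)])))).length := by rw [hlen]; omega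
    rw [PySem.List.pyGetD_of_nonneg _ _ (by omega : (0 : Int) ≤ n),
      List.getD_eq_getElem?_getD, hrows n.toNat hklen]
    rw [if_pos ⟨by omega, by omega⟩]
    simp only [Option.getD_some]
    congr 2
    omega
  rw [hdn]
  congr 2
  rw [List.length_cons, trirow_length]

lemma scan_small :
    scanRow ((0 : Int) :: trirow 0) (PySem.List.pyRange 1 ((2 * 0 + 2 : Nat) : Int) 1) = -1
    ∧ scanRow ((0 : Int) :: trirow 1) (PySem.List.pyRange 1 ((2 * 1 + 2 : Nat) : Int) 1) = -1 := by
  constructor <;> decide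

lemma pyGetD_cons_trirow (m : Nat) (j : Nat) (hj : j < 2 * m + 1) :
    PySem.List.pyGetD ((0 : Int) :: trirow m) ((j : Int) + 1) 0 = T m (j : Int) := by
  rw [show (j : Int) + 1 = (((j + 1 : Nat) : Nat) : Int) from by push_cast; ring,
    PySem.List.pyGetD_natCast, List.getD_cons_succ, trirow_getD m j hj]

lemma scan_val (m : Nat) (hm : 2 ≤ m) :
    scanRow ((0 : Int) :: trirow m) (PySem.List.pyRange 1 ((2 * m + 2 : Nat) : Int) 1)
      = if m % 2 = 0 then 2 else if m % 4 = 3 then 3 else 4 := by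
  have hb : (6 : Int) ≤ ((2 * m + 2 : Nat) : Int) := by push_cast; omega
  rw [PySem.List.pyRange_one_cons (by omega),
    show (1 : Int) + 1 = 2 from by norm_num, PySem.List.pyRange_one_cons (by omega),
    show (2 : Int) + 1 = 3 from by norm_num, PySem.List.pyRange_one_cons (by omega),
    show (3 : Int) + 1 = 4 from by norm_num, PySem.List.pyRange_one_cons (by omega)]
  have e1 : PySem.List.pyGetD ((0 : Int) :: trirow m) 1 0 = T m 0 := by
    have := pyGetD_cons_trirow m 0 (by omega)
    simpa using this
  have e2 : PySem.List.pyGetD ((0 : Int) :: trirow m) 2 0 = T m 1 := by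
    have := pyGetD_cons_trirow m 1 (by omega)
    rw [show ((1 : Nat) : Int) + 1 = 2 from by norm_num] at this
    simpa using this
  have e3 : PySem.List.pyGetD ((0 : Int) :: trirow m) 3 0 = T m 2 := by
    have := pyGetD_cons_trirow m 2 (by omega)
    rw [show ((2 : Nat) : Int) + 1 = 3 from by norm_num] at this
    simpa using this
  have e4 : PySem.List.pyGetD ((0 : Int) :: trirow m) 4 0 = T m 3 := by
    have := pyGetD_cons_trirow m 3 (by omega)
    rw [show ((3 : Nat) : Int) + 1 = 4 from by norm_num] at this
    simpa using this
  simp only [scanRow, e1, e2, e3, e4, T_zero m, T_one m,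
    PySem.Int.mod_eq_emod_of_pos (by norm_num : (0 : Int) < 2)]
  rw [if_neg (by norm_num)]
  obtain ⟨g1, g2⟩ := T_two_mod m
  obtain ⟨p1, p2⟩ := T_three_mod m
  by_cases hme : m % 2 = 0
  · rw [if_pos (by omega), if_pos hme]
  · rw [if_neg (by omega), if_neg hme]
    by_cases hm4 : m % 4 = 3
    · rw [if_pos (by rw [g2 (by omega)]), if_pos hm4]
    · rw [if_neg (by rw [g1 (by omega)]; norm_num), if_neg hm4,
        if_pos (by rw [p2 hm4])]

-- ===== VERDICT (by name: the statement is the Claim_ definition above) =====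
theorem compute_index_spec : Claim_equal_compute_index := by
  intro n _ hn
  have hn1 : 1 ≤ n := hn
  unfold Spec_compute_index compute_index_alt
  rw [compute_eq_scan n hn1]
  by_cases h1 : n = 1
  · subst h1
    rw [show ((1 : Int) - 1).toNat = 0 from by norm_num, scan_small.1]
    decide
  by_cases h2 : n = 2
  · subst h2
    rw [show ((2 : Int) - 1).toNat = 1 from by norm_num, scan_small.2]
    decide
  have hn3 : 3 ≤ n := by omega
  have hm2 : 2 ≤ (n - 1).toNat := by omega
  rw [scan_val (n - 1).toNat hm2]
  rw [if_neg (by omega : ¬ n ≤ 2),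
    PySem.Int.mod_eq_emod_of_pos (by norm_num : (0 : Int) < 2),
    PySem.Int.mod_eq_emod_of_pos (by norm_num : (0 : Int) < 4)]
  split_ifs <;> omega
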